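-- pv_equiv track=rewrite | github.com/Andrew-Foote/typocheck | src/main.py | iterwords
-- ===== SOURCE A (Python) =====
-- import string
-- import typing as t
--
-- def iterwords(s: str) -> t.Iterator[str]:
--     """Iterate over the strings of consective ASCII letters of the same case
--     in ``s``.
--
--     >>> tuple(iterwords('ada -b12CANGOslot.froarr'))
--     ('ada', 'b', 'CANGO', 'slot', 'froarr')
--     """
--     word: List[str] = []
--     word_is_uppercase: bool = False
--
--     def flush() -> t.Iterator[str]:
--         if word:
--             yield ''.join(word)
--             word.clear()
--
--     for c in s:
--         if word_is_uppercase: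
--             if c in string.ascii_uppercase:
--                 word.append(c)
--             else:
--                 yield from flush()
--                 if c in string.ascii_lowercase:
--                     word.append(c)
--                     word_is_uppercase = False
--         else:
--             if c in string.ascii_lowercase:
--                 word.append(c)
--             else:
--                 yield from flush()
--                 if c in string.ascii_uppercase:
--                     word.append(c)
--                     word_is_uppercase = True
--
--     yield from flush()
-- ===== SOURCE B (Python) =====
-- import typing as t
--
-- def iterwords(s: str) -> t.Iterator[str]:
--     """Iterate over the strings of consective ASCII letters of the same case
--     in ``s``.
--
--     >>> tuple(iterwords('ada -b12CANGOslot.froarr'))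
--     ('ada', 'b', 'CANGO', 'slot', 'froarr')
--     """
--     def key(c: str) -> int:
--         if 'A' <= c <= 'Z':
--             return 1
--         if 'a' <= c <= 'z':
--             return 2
--         return 0
--
--     n = len(s)
--     i = 0
--     while i < n:
--         kk = key(s[i])
--         j = i + 1
--         while j < n and key(s[j]) == kk:
--             j += 1
--         if kk:
--             yield s[i:j]
--         i = j
-- ===== Notes on version B (the rewrite author's own statement) =====
-- stated objective: alternative
-- what changed: Replaced A's character-by-character accumulator with a word buffer, a case-mode flag and a flush sub-generator by a two-pointer index scan that finds the end of each maximal same-case run with an inner while loop and slices the run directly out of the string.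
import Mathlib
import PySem

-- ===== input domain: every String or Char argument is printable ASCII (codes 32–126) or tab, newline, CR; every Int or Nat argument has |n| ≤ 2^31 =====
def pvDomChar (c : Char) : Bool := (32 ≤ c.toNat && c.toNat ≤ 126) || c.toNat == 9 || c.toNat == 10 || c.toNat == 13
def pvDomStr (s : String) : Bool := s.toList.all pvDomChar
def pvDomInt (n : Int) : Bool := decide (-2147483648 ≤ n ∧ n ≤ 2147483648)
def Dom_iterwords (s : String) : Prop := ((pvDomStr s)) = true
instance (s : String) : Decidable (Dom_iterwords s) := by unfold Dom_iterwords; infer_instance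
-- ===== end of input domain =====

-- B replaces A's stateful flush/mode-flag accumulator with a two-pointer span scan that
-- slices each maximal same-case run directly out of the string (objective: alternative).
-- Both A and B return lazy iterators in Python; the equivalence is about the yielded sequence.

-- ===== PORT A =====
-- string.ascii_uppercase / string.ascii_lowercase
def aUpper : List Char := "ABCDEFGHIJKLMNOPQRSTUVWXYZ".toList
def aLower : List Char := "abcdefghijklmnopqrstuvwxyz".toList

-- the nested generator 'flush': yields ''.join(word) if word is nonempty and clears word
def aFlush (out : List String) (word : List Char) : List String × List Char :=
  if word ≠ [] then (out ++ [String.ofList word], []) else (out, word)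

-- the body of A's 'for c in s' loop, acting on state (yielded so far, word, word_is_uppercase)
def aStep (st : List String × List Char × Bool) (c : Char) : List String × List Char × Bool :=
  match st with
  | (out, word, up) =>
    if up then
      if aUpper.contains c then (out, word ++ [c], up)
      else
        let p := aFlush out word
        if aLower.contains c then (p.1, p.2 ++ [c], false) else (p.1, p.2, up)
    else
      if aLower.contains c then (out, word ++ [c], up)
      else
        let p := aFlush out word
        if aUpper.contains c then (p.1, p.2 ++ [c], true) else (p.1, p.2, up)

def iterwords (s : String) : List String :=
  let fin := s.toList.foldl aStep ([], [], false)
  (aFlush fin.1 fin.2.1).1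

-- ===== PORT B =====
-- key(c): 1 for 'A'..'Z', 2 for 'a'..'z', 0 otherwise
def bKey (c : Char) : Nat :=
  if 'A' ≤ c ∧ c ≤ 'Z' then 1 else if 'a' ≤ c ∧ c ≤ 'z' then 2 else 0

-- inner 'while j < n and key(s[j]) == kk: j += 1'  (s[j] via getD: j < n always in range)
def bScan (cs : List Char) (n kk j : Nat) : Nat :=
  if j < n ∧ (bKey (cs.getD j ' ') == kk) = true then bScan cs n kk (j + 1) else j
termination_by n - j
decreasing_by omega

-- port helper for bGo's termination: the inner while loop never moves j backwards
theorem bScan_ge (cs : List Char) (n kk j : Nat) : j ≤ bScan cs n kk j := by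
  unfold bScan
  split
  · exact le_trans (Nat.le_succ j) (bScan_ge cs n kk (j + 1))
  · exact le_refl j
termination_by n - j
decreasing_by omega

-- outer 'while i < n' loop; s[i:j] with 0 ≤ i ≤ j is exactly (drop i).take (j-i)
-- (PySem.List.slice_natCast)
def bGo (cs : List Char) (n i : Nat) : List String :=
  if _h : i < n then
    let kk := bKey (cs.getD i ' ')
    let j := bScan cs n kk (i + 1)
    (if kk ≠ 0 then [String.ofList ((cs.drop i).take (j - i))] else []) ++ bGo cs n j
  else []
termination_by n - i
decreasing_by
  have := bScan_ge cs n (bKey (cs.getD i ' ')) (i + 1)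
  omega

def iterwords_alt (s : String) : List String :=
  bGo s.toList s.toList.length 0

-- ===== PRECONDITION & SPEC =====
def Spec_iterwords (s : String) (out : List String) : Prop := out = iterwords_alt s
instance (s : String) (out : List String) : Decidable (Spec_iterwords s out) := by unfold Spec_iterwords; infer_instance

-- ===== CLAIM (what is proved, stated in full; the proofs are below) =====
def Claim_equal_iterwords : Prop := ∀ (s : String), Dom_iterwords s → Spec_iterwords s (iterwords s)

-- ===== LEMMAS AND PROOFS =====

-- common specification: the list of maximal runs of same-case ASCII letters
def runs : List Char → List String
  | [] => []
  | c :: cs =>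
    (if bKey c ≠ 0 then [String.ofList (c :: cs.takeWhile (fun x => bKey x == bKey c))] else [])
      ++ runs (cs.dropWhile (fun x => bKey x == bKey c))
termination_by cs => cs.length
decreasing_by
  exact Nat.lt_succ_of_le (List.length_dropWhile_le _ _)

-- character-class bridges between A's membership tests and B's key
theorem char_eq_iff_toNat (c d : Char) : c = d ↔ c.toNat = d.toNat := by
  constructor
  · rintro rfl; rfl
  · intro h
    apply Char.ext
    exact UInt32.toNat_inj.mp h

theorem le_char_iff (c d : Char) : c ≤ d ↔ c.toNat ≤ d.toNat := by
  rw [Char.le_def, UInt32.le_iff_toNat_le]; rfl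

theorem e65A : ('A').toNat = 65 := rfl
theorem e90Z : ('Z').toNat = 90 := rfl
theorem e97a : ('a').toNat = 97 := rfl
theorem e122z : ('z').toNat = 122 := rfl

theorem contains_upper (c : Char) : aUpper.contains c = true ↔ bKey c = 1 := by
  have h1 : aUpper.contains c = true ↔ c ∈ aUpper := List.contains_iff_mem
  have h2 : bKey c = 1 ↔ 65 ≤ c.toNat ∧ c.toNat ≤ 90 := by
    unfold bKey
    simp only [le_char_iff, e65A, e90Z, e97a, e122z]
    split
    · omega
    · split <;> omega
  rw [h1, h2]
  have hl : aUpper = ['A','B','C','D','E','F','G','H','I','J','K','L','M','N','O','P','Q','R','S','T','U','V','W','X','Y','Z'] := rfl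
  rw [hl]
  have e65 : ('A').toNat = 65 := rfl
  have e66 : ('B').toNat = 66 := rfl
  have e67 : ('C').toNat = 67 := rfl
  have e68 : ('D').toNat = 68 := rfl
  have e69 : ('E').toNat = 69 := rfl
  have e70 : ('F').toNat = 70 := rfl
  have e71 : ('G').toNat = 71 := rfl
  have e72 : ('H').toNat = 72 := rfl
  have e73 : ('I').toNat = 73 := rfl
  have e74 : ('J').toNat = 74 := rfl
  have e75 : ('K').toNat = 75 := rfl
  have e76 : ('L').toNat = 76 := rfl
  have e77 : ('M').toNat = 77 := rfl
  have e78 : ('N').toNat = 78 := rfl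
  have e79 : ('O').toNat = 79 := rfl
  have e80 : ('P').toNat = 80 := rfl
  have e81 : ('Q').toNat = 81 := rfl
  have e82 : ('R').toNat = 82 := rfl
  have e83 : ('S').toNat = 83 := rfl
  have e84 : ('T').toNat = 84 := rfl
  have e85 : ('U').toNat = 85 := rfl
  have e86 : ('V').toNat = 86 := rfl
  have e87 : ('W').toNat = 87 := rfl
  have e88 : ('X').toNat = 88 := rfl
  have e89 : ('Y').toNat = 89 := rfl
  have e90 : ('Z').toNat = 90 := rfl
  simp only [List.mem_cons, List.not_mem_nil, or_false, char_eq_iff_toNat,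
    e65, e66, e67, e68, e69, e70, e71, e72, e73, e74, e75, e76, e77, e78, e79, e80, e81, e82, e83, e84, e85, e86, e87, e88, e89, e90]
  omega

theorem contains_lower (c : Char) : aLower.contains c = true ↔ bKey c = 2 := by
  have h1 : aLower.contains c = true ↔ c ∈ aLower := List.contains_iff_mem
  have h2 : bKey c = 2 ↔ 97 ≤ c.toNat ∧ c.toNat ≤ 122 := by
    unfold bKey
    simp only [le_char_iff, e65A, e90Z, e97a, e122z]
    split
    · omega
    · split <;> omega
  rw [h1, h2]
  have hl : aLower = ['a','b','c','d','e','f','g','h','i','j','k','l','m','n','o','p','q','r','s','t','u','v','w','x','y','z'] := rfl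
  rw [hl]
  have e97 : ('a').toNat = 97 := rfl
  have e98 : ('b').toNat = 98 := rfl
  have e99 : ('c').toNat = 99 := rfl
  have e100 : ('d').toNat = 100 := rfl
  have e101 : ('e').toNat = 101 := rfl
  have e102 : ('f').toNat = 102 := rfl
  have e103 : ('g').toNat = 103 := rfl
  have e104 : ('h').toNat = 104 := rfl
  have e105 : ('i').toNat = 105 := rfl
  have e106 : ('j').toNat = 106 := rfl
  have e107 : ('k').toNat = 107 := rfl
  have e108 : ('l').toNat = 108 := rfl
  have e109 : ('m').toNat = 109 := rfl
  have e110 : ('n').toNat = 110 := rfl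
  have e111 : ('o').toNat = 111 := rfl
  have e112 : ('p').toNat = 112 := rfl
  have e113 : ('q').toNat = 113 := rfl
  have e114 : ('r').toNat = 114 := rfl
  have e115 : ('s').toNat = 115 := rfl
  have e116 : ('t').toNat = 116 := rfl
  have e117 : ('u').toNat = 117 := rfl
  have e118 : ('v').toNat = 118 := rfl
  have e119 : ('w').toNat = 119 := rfl
  have e120 : ('x').toNat = 120 := rfl
  have e121 : ('y').toNat = 121 := rfl
  have e122 : ('z').toNat = 122 := rfl
  simp only [List.mem_cons, List.not_mem_nil, or_false, char_eq_iff_toNat,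
    e97, e98, e99, e100, e101, e102, e103, e104, e105, e106, e107, e108, e109, e110, e111, e112, e113, e114, e115, e116, e117, e118, e119, e120, e121, e122]
  omega


-- takeWhile / dropWhile over a uniform block
theorem takeWhile_app {α : Type} (p : α → Bool) (ws rest : List α)
    (h : ∀ x ∈ ws, p x = true) : (ws ++ rest).takeWhile p = ws ++ rest.takeWhile p := by
  induction ws with
  | nil => rfl
  | cons w ws ih =>
    simp only [List.cons_append, List.takeWhile_cons, h w (by simp)]
    simp [ih (fun x hx => h x (by simp [hx]))]

theorem dropWhile_app {α : Type} (p : α → Bool) (ws rest : List α)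
    (h : ∀ x ∈ ws, p x = true) : (ws ++ rest).dropWhile p = rest.dropWhile p := by
  induction ws with
  | nil => rfl
  | cons w ws ih =>
    simp only [List.cons_append, List.dropWhile_cons, h w (by simp)]
    exact ih (fun x hx => h x (by simp [hx]))

-- splitting a maximal nonempty uniform letter block off the front
theorem runs_break (κ : Nat) (word rest : List Char) (hne : word ≠ [])
    (huni : ∀ x ∈ word, bKey x = κ) (hκ : κ ≠ 0)
    (hrest : ∀ c, rest.head? = some c → bKey c ≠ κ) :
    runs (word ++ rest) = String.ofList word :: runs rest := by
  match word with
  | [] => exact absurd rfl hne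
  | w :: ws =>
    have hw : bKey w = κ := huni w (by simp)
    have hws : ∀ x ∈ ws, (fun x => bKey x == bKey w) x = true := by
      intro x hx; simp [hw, huni x (by simp [hx])]
    have htr : rest.takeWhile (fun x => bKey x == bKey w) = [] := by
      cases rest with
      | nil => rfl
      | cons r rs =>
        have : bKey r ≠ κ := hrest r rfl
        simp [hw, this]
    have hdr : rest.dropWhile (fun x => bKey x == bKey w) = rest := by
      cases rest with
      | nil => rfl
      | cons r rs =>
        have : bKey r ≠ κ := hrest r rfl
        simp [hw, this]
    rw [List.cons_append, runs, takeWhile_app _ ws rest hws, dropWhile_app _ ws rest hws,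
      htr, hdr, if_pos (by rw [hw]; exact hκ)]
    simp

-- a run of non-letters is skipped entirely
theorem runs_dropWhile_zero (cs : List Char) :
    runs (cs.dropWhile (fun x => bKey x == 0)) = runs cs := by
  cases cs with
  | nil => rfl
  | cons d ds =>
    by_cases hd : bKey d = 0
    · rw [List.dropWhile_cons, if_pos (by simp [hd])]
      conv_rhs => rw [runs, if_neg (by simp [hd])]
      simp [hd]
    · rw [List.dropWhile_cons, if_neg (by simp [hd])]

theorem runs_zero_cons (c : Char) (cs : List Char) (h : bKey c = 0) :
    runs (c :: cs) = runs cs := by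
  rw [runs, if_neg (by simp [h])]
  simp only [List.nil_append, h]
  exact runs_dropWhile_zero cs

-- ===== A side =====
theorem aFlush_nil (out : List String) : aFlush out [] = (out, []) := by simp [aFlush]

theorem aFlush_ne (out : List String) (w : List Char) (h : w ≠ []) :
    aFlush out w = (out ++ [String.ofList w], []) := by simp [aFlush, h]

theorem bKey_cases (c : Char) : bKey c = 0 ∨ bKey c = 1 ∨ bKey c = 2 := by
  unfold bKey; split_ifs <;> simp

theorem aInv (rest : List Char) (out : List String) (word : List Char) (up : Bool)
    (h : ∀ x ∈ word, bKey x = if up then 1 else 2) :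
    (aFlush (rest.foldl aStep (out, word, up)).1 (rest.foldl aStep (out, word, up)).2.1).1
      = out ++ runs (word ++ rest) := by
  induction rest generalizing out word up with
  | nil =>
    simp only [List.foldl_nil, List.append_nil]
    by_cases hw : word = []
    · subst hw; simp [aFlush, runs]
    · rw [aFlush, if_pos hw]
      have hb := runs_break (if up then 1 else 2) word [] hw h (by cases up <;> simp)
        (by intro c hc; simp at hc)
      rw [List.append_nil] at hb
      rw [hb]
      simp [runs]
  | cons c cs ih =>
    rw [List.foldl_cons]
    by_cases hc1 : bKey c = 1 <;> by_cases hc2 : bKey c = 2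
    · omega
    all_goals cases up
    · -- bKey c = 1, up = false : flush, start an uppercase word
      have hu : aUpper.contains c = true := (contains_upper c).mpr hc1
      have hl : aLower.contains c = false := by
        apply Bool.eq_false_iff.mpr; intro hh; have := (contains_lower c).mp hh; omega
      by_cases hw : word = []
      · subst hw
        simp only [aStep, hu, hl, aFlush_nil, Bool.false_eq_true, if_false, if_true,
          List.nil_append]
        simpa using ih out [c] true (by intro x hx; simp at hx; simp [hx, hc1])
      · simp only [aStep, hu, hl, aFlush_ne out word hw, Bool.false_eq_true, if_false,
          if_true, List.nil_append]
        have hb : runs (word ++ c :: cs) = String.ofList word :: runs (c :: cs) :=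
          runs_break 2 word (c :: cs) hw (by intro x hx; simpa using h x hx)
            (by omega) (by intro d hd; simp at hd; subst hd; omega)
        rw [hb]
        simpa using ih (out ++ [String.ofList word]) [c] true
          (by intro x hx; simp at hx; simp [hx, hc1])
    · -- bKey c = 1, up = true : append
      have hu : aUpper.contains c = true := (contains_upper c).mpr hc1
      simp only [aStep, hu, if_true]
      rw [ih out (word ++ [c]) true
        (by intro x hx; simp at hx
            rcases hx with hx | hx
            · exact h x (by simp [hx])
            · simp [hx, hc1])]
      simp
    · -- bKey c = 2, up = false : append
      have hl : aLower.contains c = true := (contains_lower c).mpr hc2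
      simp only [aStep, hl, Bool.false_eq_true, if_false, if_true]
      rw [ih out (word ++ [c]) false
        (by intro x hx; simp at hx
            rcases hx with hx | hx
            · exact h x (by simp [hx])
            · simp [hx, hc2])]
      simp
    · -- bKey c = 2, up = true : flush, start a lowercase word
      have hu : aUpper.contains c = false := by
        apply Bool.eq_false_iff.mpr; intro hh; have := (contains_upper c).mp hh; omega
      have hl : aLower.contains c = true := (contains_lower c).mpr hc2
      by_cases hw : word = []
      · subst hw
        simp only [aStep, hu, hl, aFlush_nil, Bool.false_eq_true, if_false, if_true,
          List.nil_append]
        simpa using ih out [c] false (by intro x hx; simp at hx; simp [hx, hc2])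
      · simp only [aStep, hu, hl, aFlush_ne out word hw, Bool.false_eq_true, if_false,
          if_true, List.nil_append]
        have hb : runs (word ++ c :: cs) = String.ofList word :: runs (c :: cs) :=
          runs_break 1 word (c :: cs) hw (by intro x hx; simpa using h x hx)
            (by omega) (by intro d hd; simp at hd; subst hd; omega)
        rw [hb]
        simpa using ih (out ++ [String.ofList word]) [c] false
          (by intro x hx; simp at hx; simp [hx, hc2])
    · -- bKey c = 0, up = false : flush, mode unchanged
      have hc0 : bKey c = 0 := by have := bKey_cases c; omega
      have hu : aUpper.contains c = false := by
        apply Bool.eq_false_iff.mpr; intro hh; have := (contains_upper c).mp hh; omega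
      have hl : aLower.contains c = false := by
        apply Bool.eq_false_iff.mpr; intro hh; have := (contains_lower c).mp hh; omega
      by_cases hw : word = []
      · subst hw
        simp only [aStep, hu, hl, aFlush_nil, Bool.false_eq_true, if_false, List.nil_append]
        rw [runs_zero_cons c cs hc0]
        simpa using ih out [] false (by intro x hx; simp at hx)
      · simp only [aStep, hu, hl, aFlush_ne out word hw, Bool.false_eq_true, if_false,
          List.nil_append]
        have hb : runs (word ++ c :: cs) = String.ofList word :: runs (c :: cs) :=
          runs_break 2 word (c :: cs) hw (by intro x hx; simpa using h x hx)
            (by omega) (by intro d hd; simp at hd; subst hd; omega)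
        rw [hb, runs_zero_cons c cs hc0]
        simpa using ih (out ++ [String.ofList word]) [] false (by intro x hx; simp at hx)
    · -- bKey c = 0, up = true : flush, mode unchanged
      have hc0 : bKey c = 0 := by have := bKey_cases c; omega
      have hu : aUpper.contains c = false := by
        apply Bool.eq_false_iff.mpr; intro hh; have := (contains_upper c).mp hh; omega
      have hl : aLower.contains c = false := by
        apply Bool.eq_false_iff.mpr; intro hh; have := (contains_lower c).mp hh; omega
      by_cases hw : word = []
      · subst hw
        simp only [aStep, hu, hl, aFlush_nil, Bool.false_eq_true, if_false, List.nil_append]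
        rw [runs_zero_cons c cs hc0]
        simpa using ih out [] true (by intro x hx; simp at hx)
      · simp only [aStep, hu, hl, aFlush_ne out word hw, Bool.false_eq_true, if_false,
          List.nil_append]
        have hb : runs (word ++ c :: cs) = String.ofList word :: runs (c :: cs) :=
          runs_break 1 word (c :: cs) hw (by intro x hx; simpa using h x hx)
            (by omega) (by intro d hd; simp at hd; subst hd; omega)
        rw [hb, runs_zero_cons c cs hc0]
        simpa using ih (out ++ [String.ofList word]) [] true (by intro x hx; simp at hx)

-- ===== B side =====
theorem bScan_spec (cs : List Char) (kk j : Nat) (hj : j ≤ cs.length) :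
    bScan cs cs.length kk j = j + ((cs.drop j).takeWhile (fun x => bKey x == kk)).length := by
  unfold bScan
  split
  · rename_i hcond
    obtain ⟨hlt, hkey⟩ := hcond
    have hg : cs.getD j ' ' = cs[j] := List.getD_eq_getElem cs ' ' hlt
    rw [hg] at hkey
    rw [bScan_spec cs kk (j + 1) hlt]
    rw [List.drop_eq_getElem_cons hlt, List.takeWhile_cons, hkey]
    simp; omega
  · rename_i hcond
    by_cases hlt : j < cs.length
    · have hg : cs.getD j ' ' = cs[j] := List.getD_eq_getElem cs ' ' hlt
      have hkey : (bKey cs[j] == kk) = false := by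
        rw [← hg]
        cases hb : (bKey (cs.getD j ' ') == kk)
        · rfl
        · exact absurd ⟨hlt, hb⟩ hcond
      rw [List.drop_eq_getElem_cons hlt, List.takeWhile_cons, hkey]
      simp
    · have : cs.drop j = [] := List.drop_eq_nil_of_le (by omega)
      rw [this]
      simp
termination_by cs.length - j
decreasing_by omega

theorem take_len_takeWhile {α : Type} (p : α → Bool) (xs : List α) :
    xs.take ((xs.takeWhile p).length) = xs.takeWhile p := by
  have h := List.takeWhile_prefix (l := xs) p
  exact (List.prefix_iff_eq_take.mp h).symm

theorem drop_len_takeWhile {α : Type} (p : α → Bool) (xs : List α) :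
    xs.drop ((xs.takeWhile p).length) = xs.dropWhile p := by
  induction xs with
  | nil => rfl
  | cons x xs ih =>
    rw [List.takeWhile_cons, List.dropWhile_cons]
    cases hpx : p x
    · simp
    · simp [ih]

theorem bGo_runs (cs : List Char) (i : Nat) (hi : i ≤ cs.length) :
    bGo cs cs.length i = runs (cs.drop i) := by
  unfold bGo
  split
  · rename_i hlt
    dsimp only
    have hg : cs.getD i ' ' = cs[i] := List.getD_eq_getElem cs ' ' hlt
    rw [hg]
    have hL : ((cs.drop (i + 1)).takeWhile (fun x => bKey x == bKey cs[i])).length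
        ≤ cs.length - (i + 1) := by
      have hpre := List.IsPrefix.length_le
        (List.takeWhile_prefix (l := cs.drop (i + 1)) (fun x => bKey x == bKey cs[i]))
      simpa using hpre
    have hscan := bScan_spec cs (bKey cs[i]) (i + 1) hlt
    have hdropi : cs.drop i = cs[i] :: cs.drop (i + 1) := List.drop_eq_getElem_cons hlt
    have hjle : bScan cs cs.length (bKey cs[i]) (i + 1) ≤ cs.length := by
      rw [hscan]; omega
    have htake : (cs.drop i).take (bScan cs cs.length (bKey cs[i]) (i + 1) - i)
        = cs[i] :: (cs.drop (i + 1)).takeWhile (fun x => bKey x == bKey cs[i]) := by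
      rw [hscan, hdropi,
        show i + 1 + ((cs.drop (i + 1)).takeWhile (fun x => bKey x == bKey cs[i])).length - i
          = ((cs.drop (i + 1)).takeWhile (fun x => bKey x == bKey cs[i])).length + 1 from by
            omega,
        List.take_succ_cons, take_len_takeWhile]
    have hdropj : cs.drop (bScan cs cs.length (bKey cs[i]) (i + 1))
        = (cs.drop (i + 1)).dropWhile (fun x => bKey x == bKey cs[i]) := by
      rw [hscan, ← List.drop_drop, drop_len_takeWhile]
    rw [bGo_runs cs (bScan cs cs.length (bKey cs[i]) (i + 1)) hjle, htake, hdropj, hdropi,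
      runs]
  · rename_i hge
    rw [List.drop_eq_nil_of_le (by omega), runs]
termination_by cs.length - i
decreasing_by
  have := bScan_ge cs cs.length (bKey cs[i]) (i + 1)
  omega

-- ===== VERDICT (by name: the statement is the Claim_ definition above) =====
theorem iterwords_spec : Claim_equal_iterwords := by
  intro s _
  unfold Spec_iterwords iterwords iterwords_alt
  rw [bGo_runs s.toList 0 (by omega)]
  simpa using aInv s.toList [] [] false (by simp)
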